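-- pv_equiv track=rewrite | github.com/tilda1231/Product | src/feature_extraction.py | refine_caption
-- ===== SOURCE A (Python) =====
-- def refine_caption(caption, clothing_type):
--     keywords = {
--         "pants": ["pants", "trousers", "jeans", "leggings", "shorts"],
--         "tops": ["shirt", "t-shirt", "blouse", "top", "sweater"]
--     }
--     clothing_keywords = keywords.get(clothing_type, [])
--     words = caption.split()
--
--     # Find the first occurrence of a clothing keyword
--     for i, word in enumerate(words):
--         if word in clothing_keywords:
--             start_index = max(i - 2, 0)  # Include a few words before the keyword
--             end_index = min(i + 5, len(words))  # Include a few words after the keyword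
--             return " ".join(words[start_index:end_index])
--
--     return caption
-- ===== SOURCE B (Python) =====
-- def refine_caption(caption, clothing_type):
--     keywords = {
--         "pants": ["pants", "trousers", "jeans", "leggings", "shorts"],
--         "tops": ["shirt", "t-shirt", "blouse", "top", "sweater"]
--     }
--     clothing_keywords = keywords.get(clothing_type, [])
--     words = caption.split()
--     # Collect the first occurrence of each keyword that is present, then take the earliest.
--     positions = [words.index(k) for k in clothing_keywords if k in words]
--     if positions:
--         i = min(positions)
--         return " ".join(words[max(i - 2, 0):min(i + 5, len(words))])
--     return caption
-- ===== Notes on version B (the rewrite author's own statement) =====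
-- stated objective: alternative
-- what changed: Replaces A's forward scan over enumerated words (returning on the first word that is a keyword) with a keyword-driven formulation: collect each present keyword's first index via words.index and take the minimum of those positions.
import Mathlib
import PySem

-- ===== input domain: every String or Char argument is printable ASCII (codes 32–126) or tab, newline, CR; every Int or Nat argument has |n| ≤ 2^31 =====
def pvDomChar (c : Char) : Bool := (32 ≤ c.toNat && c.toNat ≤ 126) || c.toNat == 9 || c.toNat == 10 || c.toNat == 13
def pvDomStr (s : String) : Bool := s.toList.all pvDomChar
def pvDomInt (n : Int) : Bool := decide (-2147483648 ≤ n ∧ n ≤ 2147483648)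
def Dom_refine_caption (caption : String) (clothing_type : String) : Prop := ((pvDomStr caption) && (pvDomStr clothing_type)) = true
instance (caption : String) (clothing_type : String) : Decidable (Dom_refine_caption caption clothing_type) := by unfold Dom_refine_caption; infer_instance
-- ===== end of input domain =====

-- B replaces A's forward scan over enumerated words with a keyword-driven pass
-- (first index of each present keyword, then the minimum); objective: alternative.

-- ===== PORT A =====
-- the 'for i, word in enumerate(words): …' loop of A
def pvLoopA (caption : String) (words clothing_keywords : List String) :
    List (Int × String) → String
  | [] => caption
  | (i, word) :: rest =>
    if word ∈ clothing_keywords then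
      let start_index : Int := max (i - 2) 0
      let end_index : Int := min (i + 5) (words.length : Int)
      PySem.Str.join " " (PySem.List.slice words (some start_index) (some end_index))
    else pvLoopA caption words clothing_keywords rest

def refine_caption (caption : String) (clothing_type : String) : String :=
  let keywords : PySem.Dict String (List String) :=
    PySem.Dict.ofList
      [("pants", ["pants", "trousers", "jeans", "leggings", "shorts"]),
       ("tops", ["shirt", "t-shirt", "blouse", "top", "sweater"])]
  let clothing_keywords := keywords.getD clothing_type []
  let words := PySem.Str.split₀ caption
  pvLoopA caption words clothing_keywords (PySem.List.enumerate words 0)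

-- ===== PORT B =====
def refine_caption_alt (caption : String) (clothing_type : String) : String :=
  let keywords : PySem.Dict String (List String) :=
    PySem.Dict.ofList
      [("pants", ["pants", "trousers", "jeans", "leggings", "shorts"]),
       ("tops", ["shirt", "t-shirt", "blouse", "top", "sweater"])]
  let clothing_keywords := keywords.getD clothing_type []
  let words := PySem.Str.split₀ caption
  -- [words.index(k) for k in clothing_keywords if k in words]
  let positions : List Nat := clothing_keywords.filterMap (fun k => PySem.List.index? words k)
  match PySem.List.min? positions (fun x => x) with
  | some i =>
      PySem.Str.join " " (PySem.List.slice words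
        (some (max ((i : Int) - 2) 0)) (some (min ((i : Int) + 5) (words.length : Int))))
  | none => caption

-- ===== PRECONDITION & SPEC =====
def Spec_refine_caption (caption : String) (clothing_type : String) (out : String) : Prop := out = refine_caption_alt caption clothing_type
instance (caption : String) (clothing_type : String) (out : String) : Decidable (Spec_refine_caption caption clothing_type out) := by unfold Spec_refine_caption; infer_instance

-- ===== CLAIM (what is proved, stated in full; the proofs are below) =====
def Claim_equal_refine_caption : Prop := ∀ (caption : String) (clothing_type : String), Dom_refine_caption caption clothing_type → Spec_refine_caption caption clothing_type (refine_caption caption clothing_type)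

-- ===== LEMMAS AND PROOFS =====

-- A's scan over the enumeration (from offset s) returns caption iff no word matches,
-- and otherwise the window at index s + (first matching position in the suffix).
theorem pvLoopA_eq_findIdx (caption : String) (words kws : List String)
    (ws : List String) (s : Int) :
    pvLoopA caption words kws (PySem.List.enumerate ws s) =
      match ws.findIdx? (fun w => decide (w ∈ kws)) with
      | some j =>
          PySem.Str.join " " (PySem.List.slice words
            (some (max ((s + (j : Int)) - 2) 0))
            (some (min ((s + (j : Int)) + 5) (words.length : Int))))
      | none => caption := by
  induction ws generalizing s with
  | nil => simp [PySem.List.enumerate_nil, pvLoopA]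
  | cons x t ih =>
    rw [PySem.List.enumerate_cons]
    by_cases hx : x ∈ kws
    · simp [pvLoopA, hx, List.findIdx?_cons]
    · simp only [pvLoopA, if_neg hx, ih (s + 1), List.findIdx?_cons, decide_eq_true_eq]
      cases h : t.findIdx? (fun w => decide (w ∈ kws)) with
      | none => simp
      | some j =>
        simp only [Option.map_some]
        have : s + 1 + (j : Int) = s + ((j : Int) + 1) := by ring
        push_cast
        rw [this]

-- B's minimum of first occurrences is exactly A's first matching index.
theorem min_positions_eq_findIdx (words kws : List String) :
    PySem.List.min? (kws.filterMap (fun k => PySem.List.index? words k)) (fun x => x) =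
      words.findIdx? (fun w => decide (w ∈ kws)) := by
  cases h : words.findIdx? (fun w => decide (w ∈ kws)) with
  | none =>
    rw [List.findIdx?_eq_none_iff] at h
    have hnil : kws.filterMap (fun k => PySem.List.index? words k) = [] := by
      rw [List.filterMap_eq_nil_iff]
      intro k hkkws
      rw [PySem.List.index?_eq_none_iff]
      intro hk
      exact absurd hkkws (by simpa using h k hk)
    rw [hnil]
    simp [PySem.List.min?]
  | some j =>
    rw [List.findIdx?_eq_some_iff_getElem] at h
    obtain ⟨hj, hpj, hmin⟩ := h
    -- j itself is a collected position: index? words words[j] = some j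
    have hjmem : (j : Nat) ∈ kws.filterMap (fun k => PySem.List.index? words k) := by
      have hwj : words[j] ∈ kws := by simpa using hpj
      have hsome : (PySem.List.index? words words[j]).isSome := by
        rw [PySem.List.index?_isSome_iff]
        exact List.getElem_mem hj
      obtain ⟨j', hj'⟩ := Option.isSome_iff_exists.mp hsome
      obtain ⟨hj'lt, hval, hfirst⟩ := PySem.List.getElem_of_index?_eq_some hj'
      have hle1 : j' ≤ j := by
        by_contra hgt
        exact hfirst j (by omega) rfl
      have hle2 : j ≤ j' := by
        by_contra hgt
        exact hmin j' (by omega) (by simp [hval, hwj])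
      have hjj : j' = j := le_antisymm hle1 hle2
      rw [hjj] at hj'
      exact List.mem_filterMap.mpr ⟨words[j], hwj, hj'⟩
    -- every collected position is ≥ j
    have hlb : ∀ m ∈ kws.filterMap (fun k => PySem.List.index? words k), j ≤ m := by
      intro m hm
      obtain ⟨k, hk, hidx⟩ := List.mem_filterMap.mp hm
      obtain ⟨hmlt, hval, _⟩ := PySem.List.getElem_of_index?_eq_some hidx
      rcases Nat.lt_or_ge m j with hlt | hge
      · exact absurd (by simp [hval, hk]) (hmin m hlt)
      · exact hge
    have hne : kws.filterMap (fun k => PySem.List.index? words k) ≠ [] :=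
      List.ne_nil_of_mem hjmem
    cases hmq : PySem.List.min? (kws.filterMap (fun k => PySem.List.index? words k))
        (fun x => x) with
    | none => exact absurd ((PySem.List.min?_eq_none_iff _ _).mp hmq) hne
    | some m =>
      have hmmem := PySem.List.min?_mem hmq
      have h1 : j ≤ m := hlb m hmmem
      have h2 : m ≤ j := PySem.List.min?_isMin hmq j hjmem
      exact congrArg some (Nat.le_antisymm h2 h1)

-- ===== VERDICT (by name: the statement is the Claim_ definition above) =====
theorem refine_caption_spec : Claim_equal_refine_caption := by
  intro caption clothing_type _
  unfold Spec_refine_caption refine_caption refine_caption_alt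
  dsimp only
  rw [pvLoopA_eq_findIdx, min_positions_eq_findIdx]
  cases (PySem.Str.split₀ caption).findIdx? (fun w =>
      decide (w ∈ (PySem.Dict.ofList
        [("pants", ["pants", "trousers", "jeans", "leggings", "shorts"]),
         ("tops", ["shirt", "t-shirt", "blouse", "top", "sweater"])]).getD clothing_type [])) with
  | none => rfl
  | some j => simp
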